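-- pv_equiv track=rewrite | github.com/NUSTM/COQE | Baseline_Systems/data_utils/current_program_code.py | create_predicate_info
-- ===== SOURCE A (Python) =====
-- def create_predicate_info(predicate_vocab, token_col):
--     """
--     :param predicate_vocab:
--     :param token_col:
--     :return:
--     """
--     predicate_index_col = []
--     for i in range(len(token_col)):
--         sequence_predicate_index_col = []
--
--         for token in predicate_vocab:
--             cur_token_length = len(token)
--             for j in range(len(token_col[i])):
--                 if "".join(token_col[i][j: j + cur_token_length]) == token:
--                     sequence_predicate_index_col.append([t for t in range(j, j + cur_token_length)])
--         sequence_predicate_index_col = sorted(sequence_predicate_index_col, key=lambda x:x[0])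
--         predicate_index_col.append(sequence_predicate_index_col)
--
--     return predicate_index_col
-- ===== SOURCE B (Python) =====
-- def create_predicate_info(predicate_vocab, token_col):
--     # Position-outer traversal: emit matches in ascending start order directly,
--     # so no sort pass is needed (A iterates vocab-outer and stable-sorts afterwards).
--     out = []
--     for tokens in token_col:
--         n = len(tokens)
--         seq = []
--         for j in range(n):
--             for token in predicate_vocab:
--                 L = len(token)
--                 if "".join(tokens[j:j + L]) == token:
--                     seq.append(list(range(j, j + L)))
--         out.append(seq)
--     return out
-- ===== Notes on version B (the rewrite author's own statement) =====
-- stated objective: alternative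
-- what changed: B swaps the loop nesting (start positions outermost, vocab innermost) so matches are emitted already in ascending-start, vocab-stable order, eliminating A's final stable sort pass.
import Mathlib
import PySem

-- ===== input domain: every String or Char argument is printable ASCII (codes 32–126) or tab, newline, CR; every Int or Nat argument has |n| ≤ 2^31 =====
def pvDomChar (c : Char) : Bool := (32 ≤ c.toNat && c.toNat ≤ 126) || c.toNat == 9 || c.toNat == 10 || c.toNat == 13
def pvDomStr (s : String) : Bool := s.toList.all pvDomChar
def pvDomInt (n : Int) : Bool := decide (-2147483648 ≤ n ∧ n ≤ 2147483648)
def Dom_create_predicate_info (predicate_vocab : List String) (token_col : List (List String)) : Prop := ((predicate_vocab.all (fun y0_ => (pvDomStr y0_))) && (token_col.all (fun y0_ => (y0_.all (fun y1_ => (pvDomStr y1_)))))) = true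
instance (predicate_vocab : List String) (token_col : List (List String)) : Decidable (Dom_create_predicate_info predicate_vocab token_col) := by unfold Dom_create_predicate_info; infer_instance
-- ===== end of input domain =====

-- B swaps the loop nesting (start positions outermost, vocab innermost) so matches come out
-- already in A's stable sorted order, eliminating A's final sort pass; objective: alternative.

-- ===== PORT A =====
def create_predicate_info (predicate_vocab : List String) (token_col : List (List String)) : List (List (List Int)) :=
  (PySem.List.pyRange 0 (PySem.List.len token_col)).foldl (fun predicate_index_col i =>
    let tokens := PySem.List.pyGetD token_col i []
    let seq := predicate_vocab.foldl (fun sequence_predicate_index_col token =>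
      let cur_token_length := PySem.Str.len token
      (PySem.List.pyRange 0 (PySem.List.len tokens)).foldl (fun acc j =>
        if PySem.Str.join "" (PySem.List.slice tokens (some j) (some (j + cur_token_length))) == token
        then acc ++ [PySem.List.pyRange j (j + cur_token_length)]
        else acc) sequence_predicate_index_col) []
    -- sorted(..., key=lambda x: x[0]): the key x[0] is ported total via pyGetD (default 0);
    -- Python raises IndexError on an empty match list, excluded by Pre_ below
    predicate_index_col ++ [PySem.List.sorted seq (fun x => PySem.List.pyGetD x 0 0)]) []

-- ===== PORT B =====
def create_predicate_info_alt (predicate_vocab : List String) (token_col : List (List String)) : List (List (List Int)) :=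
  token_col.foldl (fun out tokens =>
    out ++ [(PySem.List.pyRange 0 (PySem.List.len tokens)).foldl (fun seq j =>
      predicate_vocab.foldl (fun seq2 token =>
        let L := PySem.Str.len token
        if PySem.Str.join "" (PySem.List.slice tokens (some j) (some (j + L))) == token
        then seq2 ++ [PySem.List.pyRange j (j + L)]
        else seq2) seq) []]) []

-- ===== PRECONDITION & SPEC =====
-- Pre_ excludes exactly the inputs on which A raises: when "" is in the vocab and some token
-- sequence is nonempty, the empty string matches at every position with an empty index list and
-- A's sort key x[0] raises IndexError.
def Pre_create_predicate_info (predicate_vocab : List String) (token_col : List (List String)) : Prop :=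
  "" ∈ predicate_vocab → ∀ seq ∈ token_col, seq = []
instance (predicate_vocab : List String) (token_col : List (List String)) : Decidable (Pre_create_predicate_info predicate_vocab token_col) := by unfold Pre_create_predicate_info; infer_instance
def pvWitness_create_predicate_info : List String × List (List String) := (["ab", "a"], [["a", "b"], []])

def Spec_create_predicate_info (predicate_vocab : List String) (token_col : List (List String)) (out : List (List (List Int))) : Prop := out = create_predicate_info_alt predicate_vocab token_col
instance (predicate_vocab : List String) (token_col : List (List String)) (out : List (List (List Int))) : Decidable (Spec_create_predicate_info predicate_vocab token_col out) := by unfold Spec_create_predicate_info; infer_instance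

-- ===== CLAIM (what is proved, stated in full; the proofs are below) =====
def Claim_equal_create_predicate_info : Prop := ∀ (predicate_vocab : List String) (token_col : List (List String)), Dom_create_predicate_info predicate_vocab token_col → Pre_create_predicate_info predicate_vocab token_col → Spec_create_predicate_info predicate_vocab token_col (create_predicate_info predicate_vocab token_col)
-- ===== LEMMAS AND PROOFS =====

-- the shared match test, emitted element and sort key of both programs
def pvMatch (tokens : List String) (token : String) (j : Int) : Bool :=
  PySem.Str.join "" (PySem.List.slice tokens (some j) (some (j + PySem.Str.len token))) == token
def pvElt (token : String) (j : Int) : List Int := PySem.List.pyRange j (j + PySem.Str.len token)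
def pvKey (x : List Int) : Int := PySem.List.pyGetD x 0 0

-- ---- generic stability lemmas about PySem.List.sorted (insertion sort) ----

theorem pv_insertBy_pairwise {α : Type} (key : α → Int) (x : α) (l : List α)
    (h : l.Pairwise (fun a b => key a ≤ key b)) :
    (PySem.List.insertBy (fun a b => decide (key a < key b)) x l).Pairwise (fun a b => key a ≤ key b) := by
  induction l with
  | nil => simp [PySem.List.insertBy]
  | cons y t ih =>
    rw [PySem.List.insertBy]
    rcases List.pairwise_cons.mp h with ⟨hy, ht⟩
    by_cases hxy : key x < key y
    · simp only [hxy, decide_true, if_true]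
      refine List.pairwise_cons.mpr ⟨?_, h⟩
      intro b hb
      rcases List.mem_cons.mp hb with rfl | hb
      · omega
      · exact le_trans (le_of_lt hxy) (hy b hb)
    · simp only [hxy, decide_false, Bool.false_eq_true, if_false]
      refine List.pairwise_cons.mpr ⟨?_, ih ht⟩
      intro b hb
      rcases (PySem.List.mem_insertBy _ _ _ _).mp hb with rfl | hb
      · omega
      · exact hy b hb

theorem pv_insertBy_filter {α : Type} (key : α → Int) (k : Int) (x : α) (l : List α)
    (h : l.Pairwise (fun a b => key a ≤ key b)) :
    (PySem.List.insertBy (fun a b => decide (key a < key b)) x l).filter (fun a => key a == k)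
      = if key x == k then l.filter (fun a => key a == k) ++ [x] else l.filter (fun a => key a == k) := by
  induction l with
  | nil =>
    simp only [PySem.List.insertBy, List.filter_cons, List.filter_nil]
    split <;> simp
  | cons y t ih =>
    rw [PySem.List.insertBy]
    rcases List.pairwise_cons.mp h with ⟨hy, ht⟩
    by_cases hxy : key x < key y
    · simp only [hxy, decide_true, if_true]
      by_cases hk : key x = k
      · have hnil : (y :: t).filter (fun a => key a == k) = [] := by
          apply List.filter_eq_nil_iff.mpr
          intro a ha
          have : key y ≤ key a := by
            rcases List.mem_cons.mp ha with rfl | ha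
            · omega
            · exact hy a ha
          simp only [beq_iff_eq]
          omega
        simp [hk, hnil]
      · have h1 : (key x == k) = false := by simp [hk]
        simp [List.filter_cons, h1]
    · simp only [hxy, decide_false, Bool.false_eq_true, if_false]
      rw [List.filter_cons, List.filter_cons, ih ht]
      by_cases hyk : (key y == k) = true <;> by_cases hxk : (key x == k) = true <;>
        simp [hyk, hxk]

theorem pv_sorted_filter {α : Type} (key : α → Int) (k : Int) (xs : List α) :
    (PySem.List.sorted xs key).filter (fun a => key a == k) = xs.filter (fun a => key a == k) := by
  rw [PySem.List.sorted_eq_foldl_insertBy]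
  suffices h : ∀ (l : List α) (acc : List α), acc.Pairwise (fun a b => key a ≤ key b) →
      (l.foldl (fun acc x => PySem.List.insertBy (fun a b => decide (key a < key b)) x acc) acc).Pairwise (fun a b => key a ≤ key b) ∧
      (l.foldl (fun acc x => PySem.List.insertBy (fun a b => decide (key a < key b)) x acc) acc).filter (fun a => key a == k)
        = acc.filter (fun a => key a == k) ++ l.filter (fun a => key a == k) by
    simpa using (h xs [] (by simp)).2
  intro l
  induction l with
  | nil => intro acc hacc; exact ⟨hacc, by simp⟩
  | cons x t ih =>
    intro acc hacc
    have h1 := pv_insertBy_pairwise key x acc hacc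
    rcases ih _ h1 with ⟨hp, hf⟩
    refine ⟨hp, ?_⟩
    simp only [List.foldl_cons] at *
    rw [hf, pv_insertBy_filter key k x acc hacc, List.filter_cons]
    by_cases hxk : (key x == k) = true <;> simp [hxk]

theorem pv_sorted_unique {α : Type} (key : α → Int) (l1 l2 : List α)
    (h1 : l1.Pairwise (fun a b => key a ≤ key b)) (h2 : l2.Pairwise (fun a b => key a ≤ key b))
    (hf : ∀ k, l1.filter (fun a => key a == k) = l2.filter (fun a => key a == k)) : l1 = l2 := by
  induction l1 generalizing l2 with
  | nil =>
    cases l2 with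
    | nil => rfl
    | cons b t2 =>
      have := hf (key b)
      simp at this
  | cons a t1 ih =>
    cases l2 with
    | nil =>
      have := hf (key a)
      simp at this
    | cons b t2 =>
      rcases List.pairwise_cons.mp h1 with ⟨ha, ht1⟩
      rcases List.pairwise_cons.mp h2 with ⟨hb, ht2⟩
      have hab : key a = key b := by
        by_contra hne
        rcases lt_or_gt_of_ne hne with hlt | hgt
        · have := hf (key a)
          have hnil : t2.filter (fun c => key c == key a) = [] :=
            List.filter_eq_nil_iff.mpr (fun c hc => by have := hb c hc; simp; omega)
          simp [hnil, show (key b == key a) = false by simp; omega] at this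
        · have := hf (key b)
          have hnil : t1.filter (fun c => key c == key b) = [] :=
            List.filter_eq_nil_iff.mpr (fun c hc => by have := ha c hc; simp; omega)
          simp [hnil, show (key a == key b) = false by simp; omega] at this
      have hk := hf (key a)
      rw [List.filter_cons, List.filter_cons] at hk
      simp only [hab, beq_iff_eq] at hk
      rcases List.cons_eq_cons.mp hk with ⟨rfl, htail⟩
      have : t1 = t2 := by
        refine ih t2 ht1 ht2 ?_
        intro k
        by_cases hk2 : k = key a
        · subst hk2; simpa [hab] using htail
        · have := hf k
          rw [List.filter_cons, List.filter_cons] at this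
          simpa [show (key a == k) = false by simp; omega] using this
      rw [this]

-- ---- small list lemmas ----

theorem pvKey_elt (token : String) (j : Int) (h : token ≠ "") : pvKey (pvElt token j) = j := by
  have hlen : 1 ≤ PySem.Str.len token := by
    rw [PySem.Str.len_eq]
    have : token.toList ≠ [] := by simpa using h
    have := List.length_pos_iff.mpr this
    omega
  unfold pvKey pvElt
  rw [PySem.List.pyRange_one_cons (by omega)]
  simp [PySem.List.pyGetD]

theorem pv_filter_single (js : List Int) (k : Int) (p : Int → Bool) (h : js.Pairwise (· < ·)) :
    js.filter (fun j => j == k && p j) = if k ∈ js ∧ p k then [k] else [] := by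
  induction js with
  | nil => simp
  | cons a t ih =>
    rcases List.pairwise_cons.mp h with ⟨ha, ht⟩
    rw [List.filter_cons]
    by_cases hak : a = k
    · subst hak
      have hnil : t.filter (fun j => j == a && p j) = [] :=
        List.filter_eq_nil_iff.mpr (fun c hc => by have := ha c hc; simp; omega)
      by_cases hp : p a = true <;> simp [hnil]
    · have hnot : k ∈ t ∧ p k ↔ k ∈ a :: t ∧ p k := by simp [Ne.symm hak]
      rw [ih ht]
      simp only [show (a == k) = false by simp [hak], Bool.false_and, Bool.false_eq_true, if_false]
      by_cases hm : k ∈ t ∧ p k = true <;> simp [hm, Ne.symm hak]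
    
theorem pv_flatMap_if {α β : Type} (l : List α) (p : α → Bool) (f : α → β) :
    l.flatMap (fun t => if p t then [f t] else []) = (l.filter p).map f := by
  induction l with
  | nil => simp
  | cons a t ih => by_cases hp : p a = true <;> simp [hp, ih]

theorem pv_flatMap_pick {β : Type} (js : List Int) (k : Int) (g : Int → List β) (h : js.Pairwise (· < ·)) :
    js.flatMap (fun j => if j = k then g j else []) = if k ∈ js then g k else [] := by
  induction js with
  | nil => simp
  | cons a t ih =>
    rcases List.pairwise_cons.mp h with ⟨ha, ht⟩
    rw [List.flatMap_cons, ih ht]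
    by_cases hak : a = k
    · subst hak
      have hnot : a ∉ t := fun hm => by have := ha a hm; omega
      simp [hnot]
    · simp [hak, Ne.symm hak]

theorem pv_filter_const {β : Type} (l : List β) (key : β → Int) (j k : Int) (h : ∀ a ∈ l, key a = j) :
    l.filter (fun a => key a == k) = if j = k then l else [] := by
  by_cases hjk : j = k
  · subst hjk
    rw [if_pos rfl]
    exact List.filter_eq_self.mpr (fun a ha => by simp [h a ha])
  · rw [if_neg hjk]
    exact List.filter_eq_nil_iff.mpr (fun a ha => by simp [h a ha, hjk])

theorem pv_pairwise_const {β : Type} (l : List β) (key : β → Int) (c : Int) (h : ∀ a ∈ l, key a = c) :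
    l.Pairwise (fun a b => key a ≤ key b) := by
  induction l with
  | nil => simp
  | cons a t ih =>
    refine List.pairwise_cons.mpr ⟨fun b hb => ?_, ih (fun b hb => h b (by simp [hb]))⟩
    rw [h a (by simp), h b (by simp [hb])]

theorem pv_pairwise_flatMap {β : Type} (js : List Int) (g : Int → List β) (key : β → Int)
    (hj : js.Pairwise (· < ·)) (hk : ∀ j ∈ js, ∀ a ∈ g j, key a = j) :
    (js.flatMap g).Pairwise (fun a b => key a ≤ key b) := by
  induction js with
  | nil => simp
  | cons a t ih =>
    rcases List.pairwise_cons.mp hj with ⟨ha, ht⟩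
    rw [List.flatMap_cons]
    refine List.pairwise_append.mpr ⟨pv_pairwise_const _ key a (hk a (by simp)), ih ht (fun j hj' => hk j (by simp [hj'])), ?_⟩
    intro x hx y hy
    rcases List.mem_flatMap.mp hy with ⟨j, hjm, hyj⟩
    rw [hk a (by simp) x hx, hk j (by simp [hjm]) y hyj]
    exact le_of_lt (ha j hjm)

theorem pv_pyRange_pairwise (n : Nat) : (PySem.List.pyRange 0 (n : Int)).Pairwise (· < ·) := by
  rw [PySem.List.pyRange_zero_natCast]
  exact (List.pairwise_map.mpr (List.pairwise_lt_range.imp (fun h => by exact_mod_cast h)))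

-- ---- the two loop bodies in flatMap form ----

theorem pv_rawA_eq (vocab : List String) (tokens : List String) :
    vocab.foldl (fun s token =>
      (PySem.List.pyRange 0 (PySem.List.len tokens)).foldl (fun acc j =>
        if PySem.Str.join "" (PySem.List.slice tokens (some j) (some (j + PySem.Str.len token))) == token
        then acc ++ [PySem.List.pyRange j (j + PySem.Str.len token)]
        else acc) s) []
    = vocab.flatMap (fun t => ((PySem.List.pyRange 0 (PySem.List.len tokens)).filter (pvMatch tokens t)).map (pvElt t)) := by
  simp only [PySem.List.foldl_append_if, PySem.List.foldl_append_eq_flatMap]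
  rfl

theorem pv_bseq_eq (vocab : List String) (tokens : List String) :
    (PySem.List.pyRange 0 (PySem.List.len tokens)).foldl (fun seq j =>
      vocab.foldl (fun seq2 token =>
        if PySem.Str.join "" (PySem.List.slice tokens (some j) (some (j + PySem.Str.len token))) == token
        then seq2 ++ [PySem.List.pyRange j (j + PySem.Str.len token)]
        else seq2) seq) []
    = (PySem.List.pyRange 0 (PySem.List.len tokens)).flatMap
        (fun j => (vocab.filter (fun t => pvMatch tokens t j)).map (fun t => pvElt t j)) := by
  simp only [PySem.List.foldl_append_if, PySem.List.foldl_append_eq_flatMap]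
  rfl

-- ---- the per-sequence equality: A's sorted vocab-major scan = B's position-major scan ----
theorem pv_seq_eq (vocab : List String) (tokens : List String) (h : tokens ≠ [] → "" ∉ vocab) :
    PySem.List.sorted
      (vocab.flatMap (fun t => ((PySem.List.pyRange 0 (PySem.List.len tokens)).filter (pvMatch tokens t)).map (pvElt t)))
      (fun x => PySem.List.pyGetD x 0 0)
    = (PySem.List.pyRange 0 (PySem.List.len tokens)).flatMap
        (fun j => (vocab.filter (fun t => pvMatch tokens t j)).map (fun t => pvElt t j)) := by
  by_cases hnil : tokens = []
  · subst hnil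
    have hr : PySem.List.pyRange 0 (PySem.List.len ([] : List String)) = [] := rfl
    rw [hr]
    simp [PySem.List.sorted_eq_nil_iff]
  · have hv : "" ∉ vocab := h hnil
    have hjs : (PySem.List.pyRange 0 (PySem.List.len tokens)).Pairwise (· < ·) := by
      have : PySem.List.len tokens = (tokens.length : Int) := rfl
      rw [this]; exact pv_pyRange_pairwise tokens.length
    rw [show (fun x => PySem.List.pyGetD x 0 0) = pvKey from rfl]
    have hkey : ∀ t ∈ vocab, ∀ j : Int, pvKey (pvElt t j) = j := by
      intro t ht j
      exact pvKey_elt t j (fun he => hv (he ▸ ht))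
    apply pv_sorted_unique pvKey
    · exact PySem.List.sorted_pairwise _ _
    · apply pv_pairwise_flatMap _ _ pvKey hjs
      intro j _ a ha
      rcases List.mem_map.mp ha with ⟨t, htm, rfl⟩
      exact hkey t (List.mem_of_mem_filter htm) j
    · intro k
      rw [pv_sorted_filter, List.filter_flatMap, List.filter_flatMap]
      have hL : ∀ t ∈ vocab,
          (((PySem.List.pyRange 0 (PySem.List.len tokens)).filter (pvMatch tokens t)).map (pvElt t)).filter (fun a => pvKey a == k)
          = if k ∈ PySem.List.pyRange 0 (PySem.List.len tokens) ∧ pvMatch tokens t k then [pvElt t k] else [] := by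
        intro t ht
        rw [List.filter_map, List.filter_filter]
        have hp : ((PySem.List.pyRange 0 (PySem.List.len tokens)).filter
            (fun j => ((fun a => pvKey a == k) ∘ pvElt t) j && pvMatch tokens t j))
            = (PySem.List.pyRange 0 (PySem.List.len tokens)).filter (fun j => j == k && pvMatch tokens t j) := by
          apply List.filter_congr
          intro j _
          simp [Function.comp, hkey t ht j]
        rw [hp, pv_filter_single _ _ _ hjs]
        split <;> simp
      rw [List.flatMap_congr hL]
      by_cases hkj : k ∈ PySem.List.pyRange 0 (PySem.List.len tokens)
      · have hL2 : ∀ t ∈ vocab,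
            (if k ∈ PySem.List.pyRange 0 (PySem.List.len tokens) ∧ pvMatch tokens t k then [pvElt t k] else [])
            = if pvMatch tokens t k then [pvElt t k] else [] := by
          intro t _
          have hk' : 0 ≤ k ∧ k < (tokens.length : Int) := by simpa using hkj
          simp [hk']
        rw [List.flatMap_congr hL2, pv_flatMap_if]
        have hR : ∀ j ∈ PySem.List.pyRange 0 (PySem.List.len tokens),
            ((vocab.filter (fun t => pvMatch tokens t j)).map (fun t => pvElt t j)).filter (fun a => pvKey a == k)
            = if j = k then (vocab.filter (fun t => pvMatch tokens t j)).map (fun t => pvElt t j) else [] := by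
          intro j _
          apply pv_filter_const _ pvKey j k
          intro a ha
          rcases List.mem_map.mp ha with ⟨t, htm, rfl⟩
          exact hkey t (List.mem_of_mem_filter htm) j
        rw [List.flatMap_congr hR, pv_flatMap_pick _ _ _ hjs, if_pos hkj]
      · have hL2 : ∀ t ∈ vocab,
            (if k ∈ PySem.List.pyRange 0 (PySem.List.len tokens) ∧ pvMatch tokens t k then [pvElt t k] else [])
            = ([] : List (List Int)) := by
          intro t _
          have hk' : ¬(0 ≤ k ∧ k < (tokens.length : Int)) := by simpa using hkj
          exact if_neg (fun hc => hk' (by simpa using hc.1))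
        rw [List.flatMap_congr hL2]
        have hR : ∀ j ∈ PySem.List.pyRange 0 (PySem.List.len tokens),
            ((vocab.filter (fun t => pvMatch tokens t j)).map (fun t => pvElt t j)).filter (fun a => pvKey a == k)
            = if j = k then (vocab.filter (fun t => pvMatch tokens t j)).map (fun t => pvElt t j) else [] := by
          intro j _
          apply pv_filter_const _ pvKey j k
          intro a ha
          rcases List.mem_map.mp ha with ⟨t, htm, rfl⟩
          exact hkey t (List.mem_of_mem_filter htm) j
        rw [List.flatMap_congr hR, pv_flatMap_pick _ _ _ hjs, if_neg hkj]
        simp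

-- the whole per-sequence body of A equals the whole per-sequence body of B
theorem pv_G_eq (vocab : List String) (tokens : List String) (h : tokens ≠ [] → "" ∉ vocab) :
    PySem.List.sorted
      (vocab.foldl (fun s token =>
        (PySem.List.pyRange 0 (PySem.List.len tokens)).foldl (fun acc j =>
          if PySem.Str.join "" (PySem.List.slice tokens (some j) (some (j + PySem.Str.len token))) == token
          then acc ++ [PySem.List.pyRange j (j + PySem.Str.len token)]
          else acc) s) [])
      (fun x => PySem.List.pyGetD x 0 0)
    = (PySem.List.pyRange 0 (PySem.List.len tokens)).foldl (fun seq j =>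
        vocab.foldl (fun seq2 token =>
          if PySem.Str.join "" (PySem.List.slice tokens (some j) (some (j + PySem.Str.len token))) == token
          then seq2 ++ [PySem.List.pyRange j (j + PySem.Str.len token)]
          else seq2) seq) [] := by
  rw [pv_rawA_eq, pv_bseq_eq]
  exact pv_seq_eq vocab tokens h

-- ===== VERDICT (by name: the statement is the Claim_ definition above) =====
theorem create_predicate_info_spec : Claim_equal_create_predicate_info := by
  unfold Claim_equal_create_predicate_info
  intro vocab tc hdom hpre
  unfold Spec_create_predicate_info create_predicate_info create_predicate_info_alt
  simp only [PySem.List.foldl_append_singleton_eq_map, List.nil_append]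
  change List.map
      ((fun tokens => PySem.List.sorted
        (List.foldl (fun s token =>
          List.foldl (fun acc j =>
            if (PySem.Str.join "" (PySem.List.slice tokens (some j) (some (j + PySem.Str.len token))) == token) = true
            then acc ++ [PySem.List.pyRange j (j + PySem.Str.len token)]
            else acc) s (PySem.List.pyRange 0 (PySem.List.len tokens))) [] vocab)
        (fun x => PySem.List.pyGetD x 0 0)) ∘ (fun i => PySem.List.pyGetD tc i []))
      (PySem.List.pyRange 0 (PySem.List.len tc))
    = List.map (fun tokens => List.foldl (fun seq j =>
        List.foldl (fun seq2 token =>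
          if (PySem.Str.join "" (PySem.List.slice tokens (some j) (some (j + PySem.Str.len token))) == token) = true
          then seq2 ++ [PySem.List.pyRange j (j + PySem.Str.len token)]
          else seq2) seq vocab) [] (PySem.List.pyRange 0 (PySem.List.len tokens))) tc
  rw [← List.map_map, PySem.List.map_pyGetD_pyRange_zero]
  apply List.map_congr_left
  intro tokens htok
  exact pv_G_eq vocab tokens (fun hne hv => hne (hpre hv tokens htok))
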